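-- pv_equiv track=rewrite | github.com/prosk/python-learning | algoexpert/easy/opt_freelance.py | optimal_freelancing
-- ===== SOURCE A (Python) =====
-- def optimal_freelancing(jobs):
--     DAYS_CNT = 7
--     profit = 0
--     sorted_jobs = sorted(jobs, key = lambda x: x["payment"], reverse = True)
--     timeline = [False] * DAYS_CNT
--     for job in sorted_jobs:
--         max_time = min(job["deadline"], DAYS_CNT)
--         #for ind in range(max_time - 1, -1, -1):
--         for ind in reversed(range(max_time)):
--             if timeline[ind] == False:
--                 timeline[ind] = True
--                 profit += job["payment"]
--                 break
--     return profit
-- ===== SOURCE B (Python) =====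
-- def optimal_freelancing(jobs):
--     # Transposed (day-major) greedy: instead of scanning a boolean timeline per job,
--     # walk the 7 days from last to first and give each day to the first not-yet-taken
--     # job (in payment-descending order) whose deadline covers that day.
--     by_pay = sorted(jobs, key=lambda j: j["payment"], reverse=True)
--     profit = 0
--     for day in range(7, 0, -1):
--         for i in range(len(by_pay)):
--             if by_pay[i]["deadline"] >= day:
--                 profit += by_pay[i]["payment"]
--                 by_pay.pop(i)
--                 break
--     return profit
-- ===== Notes on version B (the rewrite author's own statement) =====
-- stated objective: alternative
-- what changed: A's job-major greedy (each payment-sorted job scans a boolean 7-day timeline backwards for a free slot) is transposed into a day-major greedy: loop over days 7 down to 1 and give each day to the first remaining payment-sorted job whose deadline covers it, removing that job from the list.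
-- outside the precondition, e.g. on optimal_freelancing([{'payment': 3}]): A raises KeyError, B raises KeyError
import Mathlib
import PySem

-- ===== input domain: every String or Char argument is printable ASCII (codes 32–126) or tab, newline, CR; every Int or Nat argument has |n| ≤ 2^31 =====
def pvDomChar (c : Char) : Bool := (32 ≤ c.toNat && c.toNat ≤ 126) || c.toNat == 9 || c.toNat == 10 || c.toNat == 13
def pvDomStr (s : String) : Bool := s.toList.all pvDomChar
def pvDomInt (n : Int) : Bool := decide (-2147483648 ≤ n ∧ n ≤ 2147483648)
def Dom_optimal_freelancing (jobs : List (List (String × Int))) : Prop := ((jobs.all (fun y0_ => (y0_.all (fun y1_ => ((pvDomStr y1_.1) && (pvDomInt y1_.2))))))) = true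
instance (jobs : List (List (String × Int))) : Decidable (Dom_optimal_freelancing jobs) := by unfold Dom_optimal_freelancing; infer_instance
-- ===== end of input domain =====

-- B transposes A's greedy: instead of a job-major loop scanning a boolean 7-day timeline
-- backwards for each payment-sorted job, B loops over the days 7 down to 1 and gives each
-- day to the first remaining payment-sorted job whose deadline covers it; objective: alternative.

-- ===== PORT A =====
-- inner loop 'for ind in reversed(range(max_time)): if timeline[ind] == False: …; break'
-- (exact: every ind produced by the range satisfies 0 ≤ ind < 7 = timeline length, so getD/set
--  at ind.toNat is Python's in-range timeline[ind] read/write)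
def pvPlaceA (payment : Int) : List Int → List Bool × Int → List Bool × Int
  | [], st => st
  | ind :: rest, (timeline, profit) =>
    if timeline.getD ind.toNat true = false then
      (timeline.set ind.toNat true, profit + payment)
    else pvPlaceA payment rest (timeline, profit)

def optimal_freelancing (jobs : List (List (String × Int))) : Int :=
  -- job["payment"] / job["deadline"]: Pre_ guarantees the keys exist, so getD's default is never read
  let sorted_jobs := PySem.List.sorted jobs (fun j => (PySem.Dict.mk j).getD "payment" 0) true
  let res := sorted_jobs.foldl
    (fun st job =>
      let max_time := min ((PySem.Dict.mk job).getD "deadline" 0) 7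
      pvPlaceA ((PySem.Dict.mk job).getD "payment" 0)
        ((PySem.List.pyRange 0 max_time 1).reverse) st)
    (List.replicate 7 false, 0)
  res.2

-- ===== PORT B =====
-- inner loop 'for i in range(len(by_pay)): if by_pay[i]["deadline"] >= day: profit += …;
-- by_pay.pop(i); break' ported as a left-to-right structural scan returning the payment of
-- the first hit together with the list with that element popped (exact: same scan, same pop)
def pvPickB (day : Int) : List (List (String × Int)) → Option (Int × List (List (String × Int)))
  | [] => none
  | job :: rest =>
    if (PySem.Dict.mk job).getD "deadline" 0 ≥ day then
      some ((PySem.Dict.mk job).getD "payment" 0, rest)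
    else
      (pvPickB day rest).map (fun pr => (pr.1, job :: pr.2))

def optimal_freelancing_alt (jobs : List (List (String × Int))) : Int :=
  let by_pay := PySem.List.sorted jobs (fun j => (PySem.Dict.mk j).getD "payment" 0) true
  let res := (PySem.List.pyRange 7 0 (-1)).foldl
    (fun (st : List (List (String × Int)) × Int) day =>
      match pvPickB day st.1 with
      | none => st
      | some pr => (pr.2, st.2 + pr.1)) (by_pay, 0)
  res.2

-- ===== PRECONDITION & SPEC =====
-- Pre_ excludes exactly the inputs where Python A raises KeyError: a job missing "payment" or "deadline".
def Pre_optimal_freelancing (jobs : List (List (String × Int))) : Prop :=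
  ∀ job ∈ jobs, ((PySem.Dict.mk job).get? "payment").isSome ∧ ((PySem.Dict.mk job).get? "deadline").isSome
instance (jobs : List (List (String × Int))) : Decidable (Pre_optimal_freelancing jobs) := by
  unfold Pre_optimal_freelancing; infer_instance

def pvWitness_optimal_freelancing : (List (List (String × Int))) :=
  [[("deadline", 2), ("payment", 5)], [("deadline", 1), ("payment", 9)]]

def Spec_optimal_freelancing (jobs : List (List (String × Int))) (out : Int) : Prop := out = optimal_freelancing_alt jobs
instance (jobs : List (List (String × Int))) (out : Int) : Decidable (Spec_optimal_freelancing jobs out) := by unfold Spec_optimal_freelancing; infer_instance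

-- ===== CLAIM (what is proved, stated in full; the proofs are below) =====
def Claim_equal_optimal_freelancing : Prop := ∀ (jobs : List (List (String × Int))), Dom_optimal_freelancing jobs → Pre_optimal_freelancing jobs → Spec_optimal_freelancing jobs (optimal_freelancing jobs)

-- ===== LEMMAS AND PROOFS =====

-- A's fold step / fold, generalized over the number of days t
def pvStepA (t : Nat) (st : List Bool × Int) (job : List (String × Int)) : List Bool × Int :=
  pvPlaceA ((PySem.Dict.mk job).getD "payment" 0)
    ((PySem.List.pyRange 0 (min ((PySem.Dict.mk job).getD "deadline" 0) (t : Int)) 1).reverse) st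

def pvAgen (t : Nat) (L : List (List (String × Int))) : Int :=
  (L.foldl (pvStepA t) (List.replicate t false, 0)).2

-- B's day-major recursion, generalized over the number of days t
def pvBgen : Nat → List (List (String × Int)) → Int
  | 0, _ => 0
  | t + 1, L =>
    match pvPickB ((t : Int) + 1) L with
    | none => pvBgen t L
    | some pr => pr.1 + pvBgen t pr.2

lemma pvPlaceA_fst_len (p : Int) (inds : List Int) (tl : List Bool) (pr : Int) :
    (pvPlaceA p inds (tl, pr)).1.length = tl.length := by
  induction inds generalizing tl pr with
  | nil => rfl
  | cons a rest ih =>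
    simp only [pvPlaceA]
    split
    · simp
    · exact ih tl pr

lemma pvPlaceA_shift (p : Int) (inds : List Int) (tl : List Bool) (pr q : Int) :
    pvPlaceA p inds (tl, pr + q) = ((pvPlaceA p inds (tl, pr)).1, (pvPlaceA p inds (tl, pr)).2 + q) := by
  induction inds generalizing tl pr with
  | nil => rfl
  | cons a rest ih =>
    simp only [pvPlaceA]
    split
    · simp; ring
    · exact ih tl pr

lemma pvFoldA_shift (t : Nat) (L : List (List (String × Int))) (tl : List Bool) (pr q : Int) :
    L.foldl (pvStepA t) (tl, pr + q) = ((L.foldl (pvStepA t) (tl, pr)).1, (L.foldl (pvStepA t) (tl, pr)).2 + q) := by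
  induction L generalizing tl pr with
  | nil => rfl
  | cons job rest ih =>
    simp only [List.foldl_cons, pvStepA, pvPlaceA_shift]
    rw [ih]

-- a pvPlaceA scan whose indices all lie inside s ignores an appended last cell
lemma pvPlaceA_append (p : Int) (inds : List Int) (s : List Bool) (b : Bool) (pr : Int)
    (h : ∀ i ∈ inds, 0 ≤ i ∧ i < (s.length : Int)) :
    pvPlaceA p inds (s ++ [b], pr) = ((pvPlaceA p inds (s, pr)).1 ++ [b], (pvPlaceA p inds (s, pr)).2) := by
  induction inds generalizing s pr with
  | nil => rfl
  | cons a rest ih =>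
    have ha := h a (List.mem_cons_self)
    have hlt : a.toNat < s.length := by omega
    simp only [pvPlaceA]
    have hget : (s ++ [b]).getD a.toNat true = s.getD a.toNat true := by
      simp [List.getD_eq_getElem?_getD, List.getElem?_append_left hlt]
    rw [hget]
    split
    · simp [hlt]
    · exact ih s pr (fun i hi => h i (List.mem_cons_of_mem a hi))


lemma pvStepA_fst_len (t : Nat) (st : List Bool × Int) (job : List (String × Int)) :
    (pvStepA t st job).1.length = st.1.length := by
  unfold pvStepA
  exact pvPlaceA_fst_len _ _ _ _

-- after the top day is taken, every later job behaves as in the (t)-day instance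
lemma pvStepA_top_true (t : Nat) (s : List Bool) (pr : Int) (job : List (String × Int))
    (hs : s.length = t) :
    pvStepA (t + 1) (s ++ [true], pr) job = ((pvStepA t (s, pr) job).1 ++ [true], (pvStepA t (s, pr) job).2) := by
  unfold pvStepA
  set d := (PySem.Dict.mk job).getD "deadline" 0 with hd
  have hcast : ((t + 1 : Nat) : Int) = (t : Int) + 1 := by push_cast; ring
  by_cases hge : (t : Int) + 1 ≤ d
  · have h1 : min d ((t + 1 : Nat) : Int) = (t : Int) + 1 := by rw [hcast]; omega
    have h2 : min d ((t : Nat) : Int) = (t : Int) := by omega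
    rw [h1, h2]
    rw [PySem.List.pyRange_one_succ_right (by positivity)]
    simp only [List.reverse_append, List.reverse_singleton, List.singleton_append]
    show pvPlaceA _ ((t : Int) :: _) _ = _
    rw [pvPlaceA]
    have hget : (s ++ [true]).getD ((t : Int)).toNat true = true := by
      simp [List.getD_eq_getElem?_getD, Int.toNat_natCast, hs]
    rw [hget]
    simp only [Bool.true_eq_false, if_false]
    exact pvPlaceA_append _ _ _ _ _ (by
      intro i hi
      rw [List.mem_reverse, PySem.List.mem_pyRange_one] at hi
      omega)
  · have h1 : min d ((t + 1 : Nat) : Int) = d := by rw [hcast]; omega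
    have h2 : min d ((t : Nat) : Int) = d := by omega
    rw [h1, h2]
    exact pvPlaceA_append _ _ _ _ _ (by
      intro i hi
      rw [List.mem_reverse, PySem.List.mem_pyRange_one] at hi
      omega)

-- a job whose deadline fits inside the first t days ignores an appended free last day
lemma pvStepA_top_false (t : Nat) (s : List Bool) (pr : Int) (job : List (String × Int))
    (hs : s.length = t) (hd : (PySem.Dict.mk job).getD "deadline" 0 ≤ (t : Int)) :
    pvStepA (t + 1) (s ++ [false], pr) job = ((pvStepA t (s, pr) job).1 ++ [false], (pvStepA t (s, pr) job).2) := by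
  unfold pvStepA
  have hcast : ((t + 1 : Nat) : Int) = (t : Int) + 1 := by push_cast; ring
  have h1 : min ((PySem.Dict.mk job).getD "deadline" 0) ((t + 1 : Nat) : Int) = min ((PySem.Dict.mk job).getD "deadline" 0) ((t : Nat) : Int) := by
    rw [hcast]; omega
  rw [h1]
  exact pvPlaceA_append _ _ _ _ _ (by
    intro i hi
    rw [List.mem_reverse, PySem.List.mem_pyRange_one] at hi
    omega)

-- the first job that can reach the last day takes exactly that day
lemma pvStepA_first (t : Nat) (s : List Bool) (pr : Int) (job : List (String × Int))
    (hs : s.length = t) (hd : (t : Int) + 1 ≤ (PySem.Dict.mk job).getD "deadline" 0) :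
    pvStepA (t + 1) (s ++ [false], pr) job = (s ++ [true], pr + (PySem.Dict.mk job).getD "payment" 0) := by
  unfold pvStepA
  have hcast : ((t + 1 : Nat) : Int) = (t : Int) + 1 := by push_cast; ring
  have h1 : min ((PySem.Dict.mk job).getD "deadline" 0) ((t + 1 : Nat) : Int) = (t : Int) + 1 := by
    rw [hcast]; omega
  rw [h1, PySem.List.pyRange_one_succ_right (by positivity)]
  simp only [List.reverse_append, List.reverse_singleton, List.singleton_append]
  show pvPlaceA _ ((t : Int) :: _) _ = _
  rw [pvPlaceA]
  have hget : (s ++ [false]).getD ((t : Int)).toNat true = false := by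
    simp [List.getD_eq_getElem?_getD, Int.toNat_natCast, hs]
  rw [hget]
  simp only [if_true]
  have hset : (s ++ [false]).set ((t : Int)).toNat true = s ++ [true] := by
    simp [Int.toNat_natCast, hs]
  rw [hset]

lemma pvFoldA_top_true (t : Nat) (L : List (List (String × Int))) :
    ∀ (s : List Bool) (pr : Int), s.length = t →
    (L.foldl (pvStepA (t + 1)) (s ++ [true], pr)).2 = (L.foldl (pvStepA t) (s, pr)).2 := by
  induction L with
  | nil => intro s pr _; rfl
  | cons job rest ih =>
    intro s pr hs
    simp only [List.foldl_cons]
    rw [pvStepA_top_true t s pr job hs]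
    have hlen : (pvStepA t (s, pr) job).1.length = t := by rw [pvStepA_fst_len]; exact hs
    rw [ih _ _ hlen]

lemma pvFoldRel (t : Nat) (L : List (List (String × Int))) :
    ∀ (s : List Bool) (pr : Int), s.length = t →
    (L.foldl (pvStepA (t + 1)) (s ++ [false], pr)).2 =
      match pvPickB ((t : Int) + 1) L with
      | none => (L.foldl (pvStepA t) (s, pr)).2
      | some pr' => (pr'.2.foldl (pvStepA t) (s, pr)).2 + pr'.1 := by
  induction L with
  | nil => intro s pr _; rfl
  | cons job rest ih =>
    intro s pr hs
    by_cases hd : (PySem.Dict.mk job).getD "deadline" 0 ≥ (t : Int) + 1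
    · simp only [pvPickB, hd, if_true, List.foldl_cons]
      rw [pvStepA_first t s pr job hs hd]
      rw [pvFoldA_top_true t rest s _ hs]
      have := pvFoldA_shift t rest s pr ((PySem.Dict.mk job).getD "payment" 0)
      rw [this]
    · rw [not_le] at hd
      have hd' : (PySem.Dict.mk job).getD "deadline" 0 ≤ (t : Int) := by omega
      simp only [List.foldl_cons]
      rw [pvStepA_top_false t s pr job hs hd']
      have hlen : (pvStepA t (s, pr) job).1.length = t := by rw [pvStepA_fst_len]; exact hs
      rw [ih _ _ hlen]
      have hnotif : ¬ ((PySem.Dict.mk job).getD "deadline" 0 ≥ (t : Int) + 1) := by omega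
      simp only [pvPickB, hnotif, if_false]
      cases hpk : pvPickB ((t : Int) + 1) rest with
      | none => simp
      | some pr' => simp [List.foldl_cons]

lemma pvFoldA_zero (L : List (List (String × Int))) (st : List Bool × Int) :
    L.foldl (pvStepA 0) st = st := by
  induction L generalizing st with
  | nil => rfl
  | cons job rest ih =>
    simp only [List.foldl_cons]
    have : pvStepA 0 st job = st := by
      unfold pvStepA
      rw [PySem.List.pyRange_one_eq_nil (by exact le_trans (min_le_right _ _) (by simp))]
      cases st; rfl
    rw [this, ih]

lemma pvAgen_eq_pvBgen (t : Nat) (L : List (List (String × Int))) : pvAgen t L = pvBgen t L := by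
  induction t generalizing L with
  | zero => unfold pvAgen pvBgen; rw [pvFoldA_zero]
  | succ t ih =>
    unfold pvAgen pvBgen
    rw [List.replicate_succ' ]
    rw [pvFoldRel t L (List.replicate t false) 0 (by simp)]
    cases hpk : pvPickB ((t : Int) + 1) L with
    | none => exact ih L
    | some pr' =>
      show (pr'.2.foldl (pvStepA t) (List.replicate t false, 0)).2 + pr'.1 = pr'.1 + pvBgen t pr'.2
      rw [show (pr'.2.foldl (pvStepA t) (List.replicate t false, 0)).2 = pvAgen t pr'.2 from rfl, ih]
      ring

lemma pvFoldB (t : Nat) :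
    ∀ (L : List (List (String × Int))) (pr : Int),
    ((PySem.List.pyRange (t : Int) 0 (-1)).foldl
      (fun (st : List (List (String × Int)) × Int) day =>
        match pvPickB day st.1 with
        | none => st
        | some pr => (pr.2, st.2 + pr.1)) (L, pr)).2 = pr + pvBgen t L := by
  induction t with
  | zero =>
    intro L pr
    rw [show ((0 : Nat) : Int) = 0 by rfl, PySem.List.pyRange_neg_one_eq_nil le_rfl]
    simp [pvBgen]
  | succ t ih =>
    intro L pr
    have hc : ((t + 1 : Nat) : Int) = (t : Int) + 1 := by push_cast; ring
    rw [hc, PySem.List.pyRange_neg_one_cons (by positivity)]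
    simp only [List.foldl_cons, add_sub_cancel_right]
    show ((PySem.List.pyRange (t : Int) 0 (-1)).foldl _
      (match pvPickB ((t : Int) + 1) L with
       | none => (L, pr)
       | some pr' => (pr'.2, pr + pr'.1))).2 = pr + pvBgen (t + 1) L
    cases hpk : pvPickB ((t : Int) + 1) L with
    | none =>
      rw [ih L pr]
      simp only [pvBgen, hpk]
    | some pr' =>
      rw [ih pr'.2 (pr + pr'.1)]
      simp only [pvBgen, hpk]
      ring

lemma pvBridgeA (jobs : List (List (String × Int))) :
    optimal_freelancing jobs = pvAgen 7 (PySem.List.sorted jobs (fun j => (PySem.Dict.mk j).getD "payment" 0) true) := rfl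

lemma pvBridgeB (jobs : List (List (String × Int))) :
    optimal_freelancing_alt jobs = pvBgen 7 (PySem.List.sorted jobs (fun j => (PySem.Dict.mk j).getD "payment" 0) true) := by
  unfold optimal_freelancing_alt
  have := pvFoldB 7 (PySem.List.sorted jobs (fun j => (PySem.Dict.mk j).getD "payment" 0) true) 0
  rw [show ((7 : Nat) : Int) = 7 from rfl] at this
  rw [this]
  ring

-- ===== VERDICT (by name: the statement is the Claim_ definition above) =====
theorem optimal_freelancing_spec : Claim_equal_optimal_freelancing := by
  intro jobs _ _
  unfold Spec_optimal_freelancing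
  rw [pvBridgeA, pvBridgeB, pvAgen_eq_pvBgen]
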